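-- pv_equiv track=rewrite | github.com/sravez/dauphine | Info/05_ChainesCaracteres/py/E05_03.py | remove_short_words
-- ===== SOURCE A (Python) =====
-- def remove_short_words(s:str, l:int)->str:
--     r = ""
--     w = ""
--     sp = ""
--     for i in range(0, len(s)):
--         if s[i] != " ":
--             w += s[i]
--         if s[i] == " " or i == len(s)-1 :
--             if len(w)>l:
--                 r += sp+w
--                 sp = " "
--             w = ""
--     return r
-- ===== SOURCE B (Python) =====
-- def remove_short_words(s: str, l: int) -> str:
--     return " ".join(w for w in s.split(" ") if len(w) > l)
-- ===== Notes on version B (the rewrite author's own statement) =====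
-- stated objective: simpler
-- what changed: Replaces the character-by-character index loop with manual word/separator accumulators (r, w, sp) by a split-on-space, filter-by-length, join-with-space pipeline over whole tokens (C-level str.split/str.join instead of per-character Python bytecode and string concatenation).
-- outside the precondition, e.g. on remove_short_words('a ', -1): A returns 'a', B returns 'a '
import Mathlib
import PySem

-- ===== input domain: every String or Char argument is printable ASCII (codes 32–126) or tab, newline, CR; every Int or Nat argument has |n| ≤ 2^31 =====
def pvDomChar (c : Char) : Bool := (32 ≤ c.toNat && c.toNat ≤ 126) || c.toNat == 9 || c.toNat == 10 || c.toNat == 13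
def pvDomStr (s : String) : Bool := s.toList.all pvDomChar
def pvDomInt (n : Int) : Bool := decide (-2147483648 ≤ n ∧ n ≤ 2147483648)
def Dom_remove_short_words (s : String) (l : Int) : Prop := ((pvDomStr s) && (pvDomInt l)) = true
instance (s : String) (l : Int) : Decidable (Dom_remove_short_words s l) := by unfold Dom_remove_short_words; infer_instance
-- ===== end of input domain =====

-- B replaces A's character-by-character loop with accumulators (r, w, sp) by a split/filter/join pipeline over whole tokens (objective: simpler).

-- ===== PORT A =====
-- A's `for i in range(0, len(s))` loop is transcribed as structural recursion over
-- s.toList (the characters in index order); Python's `i == len(s)-1` test is exactly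
-- `rest = []` on the remaining tail.  The string accumulators r, w, sp are carried as
-- List Char (Lean's own String operations are opaque; String.ofList at the end).
def pvLoopA (l : Int) : List Char → List Char → List Char → List Char → List Char
  | [], r, _, _ => r
  | c :: rest, r, w, sp =>
    -- if s[i] != " ": w += s[i]
    let w' := if c ≠ ' ' then w ++ [c] else w
    -- if s[i] == " " or i == len(s)-1:
    if c = ' ' ∨ rest = [] then
      if l < (w'.length : Int) then pvLoopA l rest (r ++ sp ++ w') [] [' ']
      else pvLoopA l rest r [] sp
    else pvLoopA l rest r w' sp

def remove_short_words (s : String) (l : Int) : String :=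
  String.ofList (pvLoopA l s.toList [] [] [])

-- ===== PORT B =====
def remove_short_words_alt (s : String) (l : Int) : String :=
  String.ofList (PySem.Chars.join [' ']
    ((PySem.Chars.splitOn s.toList [' ']).filter (fun w => decide (l < (w.length : Int)))))

-- ===== PRECONDITION & SPEC =====
-- Pre_ excludes the inputs where l < 0 AND s ends with " ": there the empty token after the
-- final space counts as a "word" of length 0 > l, and whether that phantom trailing token is
-- kept is anybody's choice — A drops it (the loop never flushes after the last index), B keeps
-- it; both behaviours are defensible on that degenerate corner, so it lies outside the claim.
def Pre_remove_short_words (s : String) (l : Int) : Prop :=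
  0 ≤ l ∨ PySem.Str.endswith s " " = false
instance (s : String) (l : Int) : Decidable (Pre_remove_short_words s l) := by
  unfold Pre_remove_short_words; infer_instance

def pvWitness_remove_short_words : String × Int := ("the cat sat on the mat", 2)

def Spec_remove_short_words (s : String) (l : Int) (out : String) : Prop :=
  out = remove_short_words_alt s l
instance (s : String) (l : Int) (out : String) : Decidable (Spec_remove_short_words s l out) := by
  unfold Spec_remove_short_words; infer_instance

-- ===== CLAIM (what is proved, stated in full; the proofs are below) =====
def Claim_equal_remove_short_words : Prop :=
  ∀ (s : String) (l : Int), Dom_remove_short_words s l → Pre_remove_short_words s l →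
    Spec_remove_short_words s l (remove_short_words s l)

-- ===== LEMMAS AND PROOFS =====

def pvMapHead (f : List Char → List Char) : List (List Char) → List (List Char)
  | [] => []
  | x :: xs => f x :: xs

-- words of cs when splitting on a single space (Python's s.split(" "))
def pvSplit : List Char → List (List Char)
  | [] => [[]]
  | c :: rest => if c = ' ' then [] :: pvSplit rest else pvMapHead (fun t => c :: t) (pvSplit rest)

-- the tokens A's loop flushes, starting with pending word w
def pvTokensW : List Char → List Char → List (List Char)
  | _, [] => []
  | w, c :: rest =>
    if c = ' ' then w :: pvTokensW [] rest
    else if rest = [] then [w ++ [c]] else pvTokensW (w ++ [c]) rest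

-- join with a leading separator sp before the first token
def pvJoinSp : List Char → List (List Char) → List Char
  | _, [] => []
  | sp, t :: ts => sp ++ t ++ pvJoinSp [' '] ts


theorem pvMapHead_nil_append (ws : List (List Char)) : pvMapHead (fun t => [] ++ t) ws = ws := by
  cases ws <;> simp [pvMapHead]

theorem pvMapHead_id (ws : List (List Char)) : pvMapHead (fun t => t) ws = ws := by
  cases ws <;> simp [pvMapHead]

theorem pvSplit_ne_nil (cs : List Char) : pvSplit cs ≠ [] := by
  induction cs with
  | nil => simp [pvSplit]
  | cons c rest ih =>
    simp only [pvSplit]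
    split
    · simp
    · cases h : pvSplit rest with
      | nil => exact absurd h ih
      | cons x xs => simp [pvMapHead]

-- splitOn.go with single-char separator computes pvSplit
theorem pvGo_eq (cs : List Char) : ∀ (fuel : Nat) (cur : List Char) (acc : List (List Char)),
    cs.length < fuel →
    PySem.Chars.splitOn.go [' '] fuel cs cur acc
      = acc.reverse ++ pvMapHead (fun t => cur.reverse ++ t) (pvSplit cs) := by
  induction cs with
  | nil =>
    intro fuel cur acc _
    cases fuel <;> simp [PySem.Chars.splitOn.go, pvSplit, pvMapHead]
  | cons c rest ih =>
    intro fuel cur acc hf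
    cases fuel with
    | zero => omega
    | succ f =>
      by_cases hc : c = ' '
      · subst hc
        have hp : List.isPrefixOf [' '] (' ' :: rest) = true := by simp [List.isPrefixOf]
        simp only [PySem.Chars.splitOn.go, hp, if_pos, List.length_cons, List.length_nil,
          Nat.zero_add, List.drop_succ_cons, List.drop_zero]
        rw [ih f [] (cur.reverse :: acc) (by simpa using Nat.lt_of_succ_lt_succ hf)]
        simp only [pvSplit, pvMapHead]
        cases pvSplit rest <;> simp
      · have hp : List.isPrefixOf [' '] (c :: rest) = true → False := by
          simp [List.isPrefixOf]; intro h; exact hc h.symm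
        simp only [PySem.Chars.splitOn.go]
        rw [if_neg (by intro h; exact hp h)]
        rw [ih f (c :: cur) acc (by simpa using Nat.lt_of_succ_lt_succ hf)]
        have hne := pvSplit_ne_nil rest
        cases hs : pvSplit rest with
        | nil => exact absurd hs hne
        | cons x xs =>
          simp [pvSplit, hc, hs, pvMapHead]

theorem pvSplitOn_eq (cs : List Char) : PySem.Chars.splitOn cs [' '] = pvSplit cs := by
  rw [PySem.Chars.splitOn, pvGo_eq cs (cs.length + 1) [] [] (by omega)]
  simp [pvMapHead_id]

-- A's loop, characterised
theorem pvLoopA_eq (l : Int) (cs : List Char) :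
    ∀ (r w sp : List Char),
    pvLoopA l cs r w sp = r ++ pvJoinSp sp ((pvTokensW w cs).filter (fun w => decide (l < (w.length : Int)))) := by
  induction cs with
  | nil => intro r w sp; simp [pvLoopA, pvTokensW, pvJoinSp]
  | cons c rest ih =>
    intro r w sp
    by_cases hc : c = ' '
    · subst hc
      simp only [pvLoopA, pvTokensW, ne_eq, not_true_eq_false, if_false]
      by_cases hw : l < (w.length : Int)
      · rw [if_pos hw, ih]
        simp [hw, pvJoinSp]
      · rw [if_neg hw, ih]
        simp [hw]
    · by_cases hr : rest = []
      · subst hr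
        by_cases hw : l ≤ (w.length : Int)
        · have hw' : l < ((w ++ [c]).length : Int) := by simp; omega
          simp [pvLoopA, hc, pvTokensW, List.filter, pvJoinSp, hw]
        · have hw' : ¬ l < ((w ++ [c]).length : Int) := by simp; omega
          simp [pvLoopA, hc, pvTokensW, List.filter, pvJoinSp, hw]
      · simp only [pvLoopA, pvTokensW, if_neg hc, if_neg hr]
        rw [if_neg (by simp [hc, hr]), ih]
        simp [hc]

-- join with separator " " equals pvJoinSp with empty leading separator
theorem pvJoin_eq (ws : List (List Char)) : PySem.Chars.join [' '] ws = pvJoinSp [] ws := by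
  induction ws with
  | nil => simp [PySem.Chars.join_nil, pvJoinSp]
  | cons t ts ih =>
    cases ts with
    | nil => simp [PySem.Chars.join_singleton, pvJoinSp]
    | cons t' ts' =>
      rw [PySem.Chars.join_cons_cons]
      have : pvJoinSp [' '] (t' :: ts') = ' ' :: pvJoinSp [] (t' :: ts') := by
        simp [pvJoinSp]
      simp [pvJoinSp, ih]

-- no trailing space: A's tokens are exactly the split tokens
theorem pvTokensW_no_trail (cs : List Char) : ∀ (w : List Char), cs ≠ [] → cs.getLast? ≠ some ' ' →
    pvTokensW w cs = pvMapHead (fun t => w ++ t) (pvSplit cs) := by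
  induction cs with
  | nil => intro w h _; exact absurd rfl h
  | cons c rest ih =>
    intro w _ hl
    by_cases hc : c = ' '
    · subst hc
      cases rest with
      | nil => exact absurd rfl hl
      | cons d rs =>
        have hrec := ih ([] : List Char) (by simp) (by simpa [List.getLast?_cons_cons] using hl)
        have h1 : pvTokensW w (' ' :: d :: rs) = w :: pvTokensW [] (d :: rs) := by
          rw [pvTokensW]; simp
        have h2 : pvSplit (' ' :: d :: rs) = [] :: pvSplit (d :: rs) := by
          rw [pvSplit]; simp
        rw [h1, hrec, pvMapHead_nil_append, h2]
        simp [pvMapHead]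
    · cases rest with
      | nil =>
        simp [pvTokensW, pvSplit, hc, pvMapHead]
      | cons d rs =>
        have hrec := ih (w ++ [c]) (by simp) (by simpa [List.getLast?_cons_cons] using hl)
        have h1 : pvTokensW w (c :: d :: rs) = pvTokensW (w ++ [c]) (d :: rs) := by
          rw [pvTokensW]; simp [hc]
        have h2 : pvSplit (c :: d :: rs) = pvMapHead (fun t => c :: t) (pvSplit (d :: rs)) := by
          rw [pvSplit]; simp [hc]
        rw [h1, hrec, h2]
        cases hs : pvSplit (d :: rs) with
        | nil => exact absurd hs (pvSplit_ne_nil (d :: rs))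
        | cons x xs => simp [pvMapHead]

-- trailing space: the split ends with an empty token and A's tokens are all but that one
theorem pvTokensW_trail (cs : List Char) : ∀ (w : List Char), cs.getLast? = some ' ' →
    ∃ ws, ws ≠ [] ∧ pvSplit cs = ws ++ [[]] ∧ pvTokensW w cs = pvMapHead (fun t => w ++ t) ws := by
  induction cs with
  | nil => intro w h; simp at h
  | cons c rest ih =>
    intro w hl
    cases rest with
    | nil =>
      simp only [List.getLast?_singleton, Option.some_inj] at hl
      subst hl
      exact ⟨[[]], by simp, by simp [pvSplit], by simp [pvTokensW, pvMapHead]⟩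
    | cons d rs =>
      obtain ⟨ws, hne, hsp, htk⟩ := ih ([] : List Char) (by simpa [List.getLast?_cons_cons] using hl)
      by_cases hc : c = ' '
      · subst hc
        have h1 : pvTokensW w (' ' :: d :: rs) = w :: pvTokensW [] (d :: rs) := by
          rw [pvTokensW]; simp
        have h2 : pvSplit (' ' :: d :: rs) = [] :: pvSplit (d :: rs) := by
          rw [pvSplit]; simp
        refine ⟨[] :: ws, by simp, ?_, ?_⟩
        · rw [h2, hsp]; rfl
        · rw [h1, htk, pvMapHead_nil_append]
          simp [pvMapHead]
      · have h1 : pvTokensW w (c :: d :: rs) = pvTokensW (w ++ [c]) (d :: rs) := by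
          rw [pvTokensW]; simp [hc]
        have h2 : pvSplit (c :: d :: rs) = pvMapHead (fun t => c :: t) (pvSplit (d :: rs)) := by
          rw [pvSplit]; simp [hc]
        obtain ⟨ws2, hne2, hsp2, htk2⟩ := ih (w ++ [c]) (by simpa [List.getLast?_cons_cons] using hl)
        have hws : ws2 = ws := by
          have h := hsp2.symm.trans hsp
          exact (List.append_left_injective [[]]).eq_iff.mp h
        subst hws
        cases hw0 : ws2 with
        | nil => exact absurd hw0 hne
        | cons w0 wt =>
          subst hw0
          refine ⟨(c :: w0) :: wt, by simp, ?_, ?_⟩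
          · rw [h2, hsp]; simp [pvMapHead]
          · rw [h1, htk2]
            simp [pvMapHead]

theorem remove_short_words_spec : Claim_equal_remove_short_words := by
  intro s l _ hpre
  unfold Spec_remove_short_words remove_short_words remove_short_words_alt
  congr 1
  rw [pvSplitOn_eq, pvJoin_eq, pvLoopA_eq]
  simp only [List.nil_append]
  rcases hcs : s.toList with _ | ⟨c, rest⟩
  · by_cases h : l < (0 : Int) <;>
      simp [pvTokensW, pvJoinSp, pvSplit, List.filter, h]
  · rcases hlast : (c :: rest).getLast? with _ | d
    · simp at hlast
    by_cases hsp : d = ' '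
    · subst hsp
      -- trailing space: Pre_ gives 0 ≤ l, and the empty trailing token is filtered out of B
      have hl : 0 ≤ l := by
        rcases hpre with h | h
        · exact h
        · exfalso
          obtain ⟨ds, hds⟩ := List.getLast?_eq_some_iff.mp hlast
          have htrue : PySem.Chars.endswith s.toList [' '] = true :=
            (PySem.Chars.endswith_iff _ _).mpr ⟨ds, by rw [hcs, hds]⟩
          rw [PySem.Str.endswith_eq, show (" " : String).toList = [' '] from rfl, htrue] at h
          exact Bool.true_eq_false.mp h
      obtain ⟨ws, hne, hsp2, htk⟩ := pvTokensW_trail (c :: rest) [] hlast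
      rw [htk, hsp2, pvMapHead_nil_append, List.filter_append]
      have hnil : List.filter (fun w => decide (l < ((w.length : Nat) : Int))) [([] : List Char)] = [] := by
        simp
        omega
      rw [hnil, List.append_nil]
    · rw [pvTokensW_no_trail (c :: rest) [] (by simp) (by rw [hlast]; simp [hsp]),
        pvMapHead_nil_append]
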